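-- pv_equiv track=rewrite | github.com/rafaelfigueredog/AOC | main.py | SeparacaoPorBits
-- ===== SOURCE A (Python) =====
-- def calculaPotencias(size):
--     potencias = []
--     i = 0
--     while 2**i <= size:
--             potencias.append(2**i)
--             i+=1
--     return potencias
--
-- def SeparacaoPorBits(palavra, size):
--
--     potencias = calculaPotencias(size)
--
--     contagembits = {}
--     contadoresUM = {}
--
--     for j in potencias:
--         dictdevalores = {}
--         contadorUm = 0
--         alternadorpos = 0
--         i = j-1
--         while (i < size):
--             if (alternadorpos == j):
--                 alternadorpos = 0
--                 i += j
--                 continue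
--
--             dictdevalores[i+1] = palavra[i]
--             alternadorpos += 1
--             if palavra[i] == "1":
--                 contadorUm += 1
--
--             i += 1
--         contagembits[j] = dictdevalores
--         contadoresUM[j] = contadorUm
--
--     return contagembits, contadoresUM
-- ===== SOURCE B (Python) =====
-- def SeparacaoPorBits(palavra, size):
--     # position-major traversal: precompute the power-of-two groups, pre-initialize
--     # both dicts in ascending group order, then one pass over positions p = 1..size,
--     # assigning p to exactly the groups j whose bit is set in p (p % (2*j) >= j).
--     potencias = []
--     j = 1
--     while j <= size:
--         potencias.append(j)
--         j *= 2
--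
--     contagembits = {j: {} for j in potencias}
--     contadoresUM = {j: 0 for j in potencias}
--
--     for p in range(1, size + 1):
--         c = palavra[p - 1]
--         one = 1 if c == "1" else 0
--         for j in potencias:
--             if p % (2 * j) >= j:
--                 contagembits[j][p] = c
--                 contadoresUM[j] += one
--
--     return contagembits, contadoresUM
-- ===== Notes on version B (the rewrite author's own statement) =====
-- stated objective: alternative
-- what changed: Replaced A's group-major stride/skip state machine (per power j, a counter-driven take-j/skip-j walk over positions) by a single position-major pass that pre-initializes both dicts for all powers in ascending order and assigns each position p to exactly the groups j with p % (2*j) >= j, producing identical dicts in identical insertion order.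
import Mathlib
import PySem

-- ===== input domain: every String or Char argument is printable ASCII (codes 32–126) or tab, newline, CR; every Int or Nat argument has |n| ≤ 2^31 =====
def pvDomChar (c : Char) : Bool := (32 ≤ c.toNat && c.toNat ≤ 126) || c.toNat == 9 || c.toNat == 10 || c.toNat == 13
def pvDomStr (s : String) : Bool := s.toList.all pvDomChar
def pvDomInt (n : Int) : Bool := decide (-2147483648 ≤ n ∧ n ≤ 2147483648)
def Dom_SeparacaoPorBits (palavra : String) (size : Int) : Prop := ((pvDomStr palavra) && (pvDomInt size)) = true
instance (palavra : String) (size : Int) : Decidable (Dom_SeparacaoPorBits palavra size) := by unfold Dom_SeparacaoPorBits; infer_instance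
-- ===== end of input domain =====

-- B replaces A's group-major stride/skip state machine by a single position-major pass with
-- pre-initialized group dicts and an arithmetic bit-membership test (alternative decomposition, same cost).


-- ===== PORT A =====
def calculaPotencias (size : Int) (i : Nat) (potencias : List Int) : List Int :=
  if _h : (2:Int) ^ i ≤ size then calculaPotencias size (i + 1) (potencias ++ [(2:Int) ^ i])
  else potencias
termination_by (size + 1 - 2 ^ i).toNat
decreasing_by
  have h1 : (1:Int) ≤ 2 ^ i := one_le_pow₀ (by norm_num)
  omega

def aInner (palavra : List Char) (size j : Int) (dictdevalores : PySem.Dict Int String)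
    (contadorUm alternadorpos i : Int) : PySem.Dict Int String × Int :=
  if _h : i < size then
    if alternadorpos = j then
      -- totality guard only: at every actual call j is a positive power of two
      if _hj : 1 ≤ j then aInner palavra size j dictdevalores contadorUm 0 (i + j)
      else (dictdevalores, contadorUm)
    else
      -- palavra[i]: IndexError (pyGet? = none) is excluded by Pre_
      let c : String := ((PySem.List.pyGet? palavra i).map (fun ch => String.ofList [ch])).getD ""
      aInner palavra size j (dictdevalores.insert (i + 1) c)
        (contadorUm + if c = "1" then 1 else 0) (alternadorpos + 1) (i + 1)
  else (dictdevalores, contadorUm)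
termination_by (size - i).toNat
decreasing_by all_goals omega

def SeparacaoPorBits (palavra : String) (size : Int) :
    (List (Int × List (Int × String))) × (List (Int × Int)) :=
  let potencias := calculaPotencias size 0 []
  let st := potencias.foldl
    (fun (st : PySem.Dict Int (PySem.Dict Int String) × PySem.Dict Int Int) j =>
      let r := aInner palavra.toList size j PySem.Dict.empty 0 0 (j - 1)
      (st.1.insert j r.1, st.2.insert j r.2))
    (PySem.Dict.empty, PySem.Dict.empty)
  (st.1.items.map (fun kv => (kv.1, kv.2.items)), st.2.items)

-- ===== PORT B =====
def bPotencias (size j : Int) : List Int :=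
  if _h : j ≤ size then
    -- totality guard only: j starts at 1 and doubles, so 1 ≤ j at every actual call
    if _hj : 1 ≤ j then j :: bPotencias size (2 * j)
    else []
  else []
termination_by (size + 1 - j).toNat
decreasing_by omega

def bStep (palavra : List Char) (potencias : List Int)
    (st : PySem.Dict Int (PySem.Dict Int String) × PySem.Dict Int Int) (p : Int) :
    PySem.Dict Int (PySem.Dict Int String) × PySem.Dict Int Int :=
  -- palavra[p-1]: IndexError (pyGet? = none) is excluded by Pre_
  let c : String := ((PySem.List.pyGet? palavra (p - 1)).map (fun ch => String.ofList [ch])).getD ""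
  let one : Int := if c = "1" then 1 else 0
  potencias.foldl
    (fun st j =>
      if j ≤ PySem.Int.mod p (2 * j) then
        (st.1.modify j PySem.Dict.empty (fun dv => dv.insert p c),
         st.2.modify j 0 (fun n => n + one))
      else st) st

def SeparacaoPorBits_alt (palavra : String) (size : Int) :
    (List (Int × List (Int × String))) × (List (Int × Int)) :=
  let potencias := bPotencias size 1
  let contagembits := potencias.foldl
    (fun (d : PySem.Dict Int (PySem.Dict Int String)) j => d.insert j PySem.Dict.empty)
    PySem.Dict.empty
  let contadoresUM := potencias.foldl
    (fun (d : PySem.Dict Int Int) j => d.insert j 0) PySem.Dict.empty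
  let st := (PySem.List.pyRange 1 (size + 1)).foldl (bStep palavra.toList potencias)
    (contagembits, contadoresUM)
  (st.1.items.map (fun kv => (kv.1, kv.2.items)), st.2.items)

-- ===== PRECONDITION & SPEC =====
-- Pre_ excludes exactly the inputs on which Python A raises IndexError
-- (0 < size and palavra shorter than size); Python B raises there as well.
def Pre_SeparacaoPorBits (palavra : String) (size : Int) : Prop :=
  size ≤ (palavra.toList.length : Int)
instance (palavra : String) (size : Int) : Decidable (Pre_SeparacaoPorBits palavra size) := by
  unfold Pre_SeparacaoPorBits; infer_instance

def pvWitness_SeparacaoPorBits : String × Int := ("", 0)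

def Spec_SeparacaoPorBits (palavra : String) (size : Int)
    (out : (List (Int × List (Int × String))) × (List (Int × Int))) : Prop :=
  out = SeparacaoPorBits_alt palavra size
instance (palavra : String) (size : Int) (out : (List (Int × List (Int × String))) × (List (Int × Int))) : Decidable (Spec_SeparacaoPorBits palavra size out) := by unfold Spec_SeparacaoPorBits; infer_instance

-- ===== CLAIM (what is proved, stated in full; the proofs are below) =====
def Claim_equal_SeparacaoPorBits : Prop := ∀ (palavra : String) (size : Int), Dom_SeparacaoPorBits palavra size → Pre_SeparacaoPorBits palavra size → Spec_SeparacaoPorBits palavra size (SeparacaoPorBits palavra size)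

-- ===== LEMMAS AND PROOFS =====

-- canonical per-group data both programs are reduced to:
-- position p (1-based) belongs to group j = 2^k iff j ≤ p % (2*j) (bit k of p is set)
def pvChr (palavra : List Char) (p : Int) : String :=
  ((PySem.List.pyGet? palavra (p - 1)).map (fun ch => String.ofList [ch])).getD ""

def pvCond (j p : Int) : Bool := decide (j ≤ PySem.Int.mod p (2 * j))

def pvGrp (size j : Int) : List Int :=
  (PySem.List.pyRange 1 (size + 1)).filter (fun p => pvCond j p)

def pvGD (palavra : List Char) (size j : Int) : PySem.Dict Int String :=
  (pvGrp size j).foldl (fun d p => d.insert p (pvChr palavra p)) PySem.Dict.empty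

def pvCN (palavra : List Char) (size j : Int) : Int :=
  (pvGrp size j).foldl (fun cu p => cu + if pvChr palavra p = "1" then 1 else 0) 0

def pvMk {ν : Type} (l : List Int) (g : Int → ν) : PySem.Dict Int ν :=
  PySem.Dict.mk (l.map (fun k => (k, g k)))

lemma pyRange_nil {a b : Int} (h : b ≤ a) : PySem.List.pyRange a b = [] := by
  apply List.eq_nil_iff_forall_not_mem.mpr
  intro x hx
  have := PySem.List.mem_pyRange_one.mp hx
  omega

lemma bPot_mem {size j₀ j : Int} (h : j ∈ bPotencias size j₀) : j₀ ≤ j ∧ j ≤ size := by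
  revert h
  induction j₀ using bPotencias.induct size with
  | case1 x h1 h2 ih =>
    intro h
    rw [bPotencias, dif_pos h1, dif_pos h2] at h
    rcases List.mem_cons.mp h with rfl | h
    · omega
    · have := ih h; omega
  | case2 x h1 h2 =>
    intro h; rw [bPotencias, dif_pos h1, dif_neg h2] at h; simp at h
  | case3 x h1 =>
    intro h; rw [bPotencias, dif_neg h1] at h; simp at h

lemma bPot_pairwise (size j₀ : Int) : (bPotencias size j₀).Pairwise (· < ·) := by
  induction j₀ using bPotencias.induct size with
  | case1 x h1 h2 ih =>
    rw [bPotencias, dif_pos h1, dif_pos h2]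
    refine List.pairwise_cons.mpr ⟨fun y hy => ?_, ih⟩
    have := bPot_mem hy; omega
  | case2 x h1 h2 => rw [bPotencias, dif_pos h1, dif_neg h2]; simp
  | case3 x h1 => rw [bPotencias, dif_neg h1]; simp

lemma bPot_nodup (size j₀ : Int) : (bPotencias size j₀).Nodup :=
  (bPot_pairwise size j₀).imp (fun h => ne_of_lt h)

lemma calc_eq_bPot (size : Int) : ∀ (i : Nat) (acc : List Int),
    calculaPotencias size i acc = acc ++ bPotencias size ((2:Int) ^ i) := by
  intro i acc
  induction i, acc using calculaPotencias.induct size with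
  | case1 i acc h ih =>
    rw [calculaPotencias, dif_pos h, ih]
    have h1 : (1:Int) ≤ 2 ^ i := one_le_pow₀ (by norm_num)
    have h2 : (2:Int) ^ (i + 1) = 2 * 2 ^ i := by ring
    rw [h2]
    conv_rhs => rw [bPotencias]
    rw [dif_pos h, dif_pos h1]
    simp
  | case2 i acc h =>
    rw [calculaPotencias, dif_neg h, bPotencias, dif_neg h]
    simp

lemma pvMk_congr {ν : Type} {l : List Int} {g g' : Int → ν}
    (h : ∀ k ∈ l, g k = g' k) : pvMk l g = pvMk l g' := by
  apply PySem.Dict.ext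
  exact List.map_congr_left (fun k hk => by rw [h k hk])

lemma getD_pvMk {ν : Type} {l : List Int} {j : Int} (hj : j ∈ l) (g : Int → ν) (d0 : ν) :
    (pvMk l g).getD j d0 = g j := by
  induction l with
  | nil => simp at hj
  | cons a l ih =>
    by_cases haj : a = j
    · subst haj
      simp [pvMk, PySem.Dict.getD, PySem.Dict.get?]
    · have hj' : j ∈ l := by
        rcases List.mem_cons.mp hj with rfl | h
        · exact absurd rfl haj
        · exact h
      have := ih hj'
      simpa [pvMk, PySem.Dict.getD, PySem.Dict.get?, haj] using this

lemma modify_pvMk {ν : Type} {l : List Int} {j : Int} (hj : j ∈ l)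
    (g : Int → ν) (d0 : ν) (f : ν → ν) :
    (pvMk l g).modify j d0 f = pvMk l (fun k => if k = j then f (g k) else g k) := by
  have hc : (pvMk l g).contains j = true := by
    simp only [pvMk, PySem.Dict.contains, List.any_eq_true]
    exact ⟨(j, g j), List.mem_map.mpr ⟨j, hj, rfl⟩, by simp⟩
  apply PySem.Dict.ext
  simp only [PySem.Dict.modify, PySem.Dict.insert, hc, if_true, getD_pvMk hj]
  simp only [pvMk, List.map_map]
  apply List.map_congr_left
  intro k hk
  by_cases hkj : k = j <;> simp [hkj]

lemma bStep_inner (palavra : List Char) (p : Int) (l : List Int) :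
    ∀ (sub : List Int), sub.Nodup → (∀ x ∈ sub, x ∈ l) →
    ∀ (g : Int → PySem.Dict Int String) (h : Int → Int),
    (sub.foldl
      (fun st j =>
        if j ≤ PySem.Int.mod p (2 * j) then
          (st.1.modify j PySem.Dict.empty (fun dv => dv.insert p (pvChr palavra p)),
           st.2.modify j 0 (fun n => n + (if pvChr palavra p = "1" then 1 else 0)))
        else st)
      ((pvMk l g, pvMk l h) : PySem.Dict Int (PySem.Dict Int String) × PySem.Dict Int Int))
    = (pvMk l (fun j => if j ∈ sub ∧ pvCond j p then (g j).insert p (pvChr palavra p) else g j),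
       pvMk l (fun j => if j ∈ sub ∧ pvCond j p then h j + (if pvChr palavra p = "1" then 1 else 0) else h j)) := by
  intro sub
  induction sub with
  | nil =>
    intro _ _ g h
    simp
  | cons a sub ih =>
    intro hnd hsub g h
    have ha : a ∈ l := hsub a List.mem_cons_self
    have hans : a ∉ sub := (List.nodup_cons.mp hnd).1
    rw [List.foldl_cons]
    by_cases hc : a ≤ PySem.Int.mod p (2 * a)
    · rw [if_pos hc, modify_pvMk ha, modify_pvMk ha,
        ih (List.nodup_cons.mp hnd).2 (fun x hx => hsub x (List.mem_cons_of_mem a hx))]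
      simp only [Prod.mk.injEq]
      refine ⟨?_, ?_⟩ <;>
      · apply congrArg (pvMk l)
        funext k
        by_cases hka : k = a
        · subst hka
          simp [hans, List.mem_cons, pvCond, hc]
        · simp [hka, List.mem_cons]
    · rw [if_neg hc,
        ih (List.nodup_cons.mp hnd).2 (fun x hx => hsub x (List.mem_cons_of_mem a hx))]
      simp only [Prod.mk.injEq]
      refine ⟨?_, ?_⟩ <;>
      · apply congrArg (pvMk l)
        funext k
        by_cases hka : k = a
        · subst hka
          simp [pvCond, hc]
        · simp [hka, List.mem_cons]

lemma bFold (palavra : List Char) (l : List Int) (hnd : l.Nodup) :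
    ∀ (ps : List Int) (g : Int → PySem.Dict Int String) (h : Int → Int),
    (ps.foldl (bStep palavra l) (pvMk l g, pvMk l h))
    = (pvMk l (fun j => (ps.filter (fun p => pvCond j p)).foldl
         (fun d p => d.insert p (pvChr palavra p)) (g j)),
       pvMk l (fun j => (ps.filter (fun p => pvCond j p)).foldl
         (fun cu p => cu + if pvChr palavra p = "1" then 1 else 0) (h j))) := by
  intro ps
  induction ps with
  | nil => intro g h; simp
  | cons p ps ih =>
    intro g h
    rw [List.foldl_cons]
    have hb : bStep palavra l (pvMk l g, pvMk l h) p =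
        (pvMk l (fun j => if j ∈ l ∧ pvCond j p then (g j).insert p (pvChr palavra p) else g j),
         pvMk l (fun j => if j ∈ l ∧ pvCond j p then h j + (if pvChr palavra p = "1" then 1 else 0) else h j)) :=
      bStep_inner palavra p l l hnd (fun x hx => hx) g h
    rw [hb, ih]
    simp only [Prod.mk.injEq]
    refine ⟨?_, ?_⟩ <;>
    · apply pvMk_congr
      intro k hk
      rw [List.filter_cons]
      by_cases hc : pvCond k p
      · simp only [hc, if_true, hk, true_and, List.foldl_cons]
      · simp only [hc, Bool.false_eq_true, if_false, hk, true_and]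

lemma aInner_eq (palavra : List Char) (size j : Int) (hj : 1 ≤ j) :
    ∀ (n : Nat) (d : PySem.Dict Int String) (cu alt i : Int), (size - i).toNat ≤ n →
    ((alt = j ∧ (2 * j) ∣ (i + 1)) ∨ (0 ≤ alt ∧ alt < j ∧ (i + 1) % (2 * j) = j + alt)) →
    aInner palavra size j d cu alt i =
      (((PySem.List.pyRange (i + 1) (size + 1)).filter (fun p => pvCond j p)).foldl
         (fun d p => d.insert p (pvChr palavra p)) d,
       ((PySem.List.pyRange (i + 1) (size + 1)).filter (fun p => pvCond j p)).foldl
         (fun cu p => cu + if pvChr palavra p = "1" then 1 else 0) cu) := by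
  intro n
  induction n with
  | zero =>
    intro d cu alt i hn _
    rw [aInner, dif_neg (by omega : ¬ i < size), pyRange_nil (by omega)]
    simp
  | succ n ih =>
    intro d cu alt i hn hinv
    by_cases hlt : i < size
    · rw [aInner]
      by_cases halt : alt = j
      · -- skip branch: the next j positions are not in group j
        have hdvd : (2 * j) ∣ (i + 1) := by
          rcases hinv with ⟨_, hd⟩ | ⟨_, h1, _⟩
          · exact hd
          · omega
        obtain ⟨q, hq⟩ := hdvd
        simp only [dif_pos hlt, if_pos halt, dif_pos hj]
        have hmodj : (i + j + 1) % (2 * j) = j + 0 := by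
          have he : i + j + 1 = j + (2 * j) * q := by omega
          rw [he, Int.add_mul_emod_self_left, Int.emod_eq_of_lt (by omega) (by omega)]
          omega
        rw [ih d cu 0 (i + j) (by omega) (Or.inr ⟨le_refl 0, by omega, hmodj⟩)]
        have hskip : ∀ p : Int, i + 1 ≤ p → p ≤ i + j → pvCond j p = false := by
          intro p hp1 hp2
          simp only [pvCond, decide_eq_false_iff_not]
          intro hle
          rw [PySem.Int.mod_eq_emod_of_pos (by omega)] at hle
          have he : p = (p - (i + 1)) + (2 * j) * q := by omega
          rw [he, Int.add_mul_emod_self_left, Int.emod_eq_of_lt (by omega) (by omega)] at hle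
          omega
        have hfe : ((PySem.List.pyRange (i + 1) (size + 1)).filter (fun p => pvCond j p))
            = ((PySem.List.pyRange (i + j + 1) (size + 1)).filter (fun p => pvCond j p)) := by
          by_cases hcase : i + j ≤ size
          · rw [PySem.List.pyRange_one_append (i + 1) (i + j + 1) (size + 1) (by omega) (by omega),
              List.filter_append]
            have h0 : (PySem.List.pyRange (i + 1) (i + j + 1)).filter (fun p => pvCond j p) = [] := by
              apply List.filter_eq_nil_iff.mpr
              intro p hp
              have hpb := PySem.List.mem_pyRange_one.mp hp
              simp [hskip p (by omega) (by omega)]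
            rw [h0, List.nil_append]
          · rw [pyRange_nil (by omega : size + 1 ≤ i + j + 1)]
            apply List.filter_eq_nil_iff.mpr
            intro p hp
            have hpb := PySem.List.mem_pyRange_one.mp hp
            simp [hskip p (by omega) (by omega)]
        rw [hfe]
      · -- insert branch: position i+1 is in group j
        have hinv2 : 0 ≤ alt ∧ alt < j ∧ (i + 1) % (2 * j) = j + alt := by
          rcases hinv with ⟨ha, _⟩ | h
          · exact absurd ha halt
          · exact h
        obtain ⟨h0, h1, hmod⟩ := hinv2
        have hq : (2 * j) * ((i + 1) / (2 * j)) + (j + alt) = i + 1 := by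
          have := Int.mul_ediv_add_emod (i + 1) (2 * j)
          omega
        set q := (i + 1) / (2 * j) with hqdef
        simp only [dif_pos hlt, if_neg halt]
        have hcond : pvCond j (i + 1) = true := by
          simp only [pvCond, decide_eq_true_eq,
            PySem.Int.mod_eq_emod_of_pos (show (0:Int) < 2 * j by omega), hmod]
          omega
        have hchr : pvChr palavra (i + 1)
            = ((PySem.List.pyGet? palavra i).map (fun ch => String.ofList [ch])).getD "" := by
          simp [pvChr]
        have hnew : ((alt + 1 = j ∧ (2 * j) ∣ (i + 1 + 1)) ∨
            (0 ≤ alt + 1 ∧ alt + 1 < j ∧ (i + 1 + 1) % (2 * j) = j + (alt + 1))) := by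
          by_cases hja : alt + 1 = j
          · refine Or.inl ⟨hja, ⟨q + 1, ?_⟩⟩
            have hr : 2 * j * (q + 1) = 2 * j * q + 2 * j := by ring
            omega
          · refine Or.inr ⟨by omega, by omega, ?_⟩
            have he : i + 1 + 1 = (j + (alt + 1)) + (2 * j) * q := by omega
            rw [he, Int.add_mul_emod_self_left, Int.emod_eq_of_lt (by omega) (by omega)]
        rw [ih _ _ (alt + 1) (i + 1) (by omega) hnew]
        rw [PySem.List.pyRange_one_cons (show i + 1 < size + 1 by omega), List.filter_cons, hcond]
        simp only [if_true, List.foldl_cons, hchr]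
    · rw [aInner, dif_neg hlt, pyRange_nil (by omega)]
      simp

lemma aInner_start (palavra : List Char) (size j : Int) (hj : 1 ≤ j) (hjs : j ≤ size) :
    aInner palavra size j PySem.Dict.empty 0 0 (j - 1) =
      (pvGD palavra size j, pvCN palavra size j) := by
  have hmod : (j - 1 + 1) % (2 * j) = j + 0 := by
    have he : j - 1 + 1 = j := by omega
    rw [he, Int.emod_eq_of_lt (by omega) (by omega)]
    omega
  rw [aInner_eq palavra size j hj (size - (j - 1)).toNat PySem.Dict.empty 0 0 (j - 1) (le_refl _)
    (Or.inr ⟨le_refl 0, by omega, hmod⟩)]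
  have hrange : j - 1 + 1 = j := by omega
  rw [hrange]
  have hgrp : (PySem.List.pyRange j (size + 1)).filter (fun p => pvCond j p) = pvGrp size j := by
    unfold pvGrp
    rw [PySem.List.pyRange_one_append 1 j (size + 1) (by omega) (by omega), List.filter_append]
    have h0 : (PySem.List.pyRange 1 j).filter (fun p => pvCond j p) = [] := by
      apply List.filter_eq_nil_iff.mpr
      intro p hp
      have hpb := PySem.List.mem_pyRange_one.mp hp
      simp only [pvCond, decide_eq_false_iff_not, Bool.not_eq_true]
      intro hle
      rw [PySem.Int.mod_eq_emod_of_pos (by omega),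
        Int.emod_eq_of_lt (by omega) (by omega)] at hle
      omega
    rw [h0, List.nil_append]
  rw [hgrp]
  rfl

lemma A_fold (palavra : List Char) (size : Int) :
    ∀ (l : List Int) (cb : PySem.Dict Int (PySem.Dict Int String)) (cu : PySem.Dict Int Int),
    (l.foldl
      (fun (st : PySem.Dict Int (PySem.Dict Int String) × PySem.Dict Int Int) j =>
        (st.1.insert j (aInner palavra size j PySem.Dict.empty 0 0 (j - 1)).1,
         st.2.insert j (aInner palavra size j PySem.Dict.empty 0 0 (j - 1)).2)) (cb, cu))
    = (l.foldl (fun d j => d.insert j (aInner palavra size j PySem.Dict.empty 0 0 (j - 1)).1) cb,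
       l.foldl (fun d j => d.insert j (aInner palavra size j PySem.Dict.empty 0 0 (j - 1)).2) cu) := by
  intro l
  induction l with
  | nil => intro cb cu; rfl
  | cons a l ih => intro cb cu; simpa using ih _ _

lemma insert_fold_items {ν : Type} (l : List Int) (hnd : l.Nodup) (v : Int → ν) :
    (l.foldl (fun (d : PySem.Dict Int ν) j => d.insert j (v j)) PySem.Dict.empty).items
      = l.map (fun j => (j, v j)) := by
  have := PySem.Dict.items_foldl_insert_fresh l (fun j => j) v PySem.Dict.empty
    (fun a _ => by simp [PySem.Dict.empty, PySem.Dict.contains])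
    (by simpa using hnd)
  simpa [PySem.Dict.empty] using this

lemma insert_fold_eq_pvMk {ν : Type} (l : List Int) (hnd : l.Nodup) (v : Int → ν) :
    (l.foldl (fun (d : PySem.Dict Int ν) j => d.insert j (v j)) PySem.Dict.empty)
      = pvMk l v :=
  PySem.Dict.ext (insert_fold_items l hnd v)

-- ===== VERDICT (by name: the statement is the Claim_ definition above) =====
theorem SeparacaoPorBits_spec : Claim_equal_SeparacaoPorBits := by
  intro palavra size _ _
  unfold Spec_SeparacaoPorBits
  have hpots : calculaPotencias size 0 [] = bPotencias size 1 := by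
    simpa using calc_eq_bPot size 0 []
  have hnd : (bPotencias size 1).Nodup := bPot_nodup size 1
  have hAside : SeparacaoPorBits palavra size =
      ((bPotencias size 1).map (fun j => (j, (pvGD palavra.toList size j).items)),
       (bPotencias size 1).map (fun j => (j, pvCN palavra.toList size j))) := by
    simp only [SeparacaoPorBits]
    rw [hpots, A_fold palavra.toList size (bPotencias size 1) PySem.Dict.empty PySem.Dict.empty]
    simp only [insert_fold_items (bPotencias size 1) hnd, List.map_map]
    simp only [Prod.mk.injEq, Function.comp_def]
    refine ⟨?_, ?_⟩ <;>
    · apply List.map_congr_left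
      intro j hjmem
      have hjb := bPot_mem hjmem
      rw [aInner_start palavra.toList size j (by omega) (by omega)]
  have hBside : SeparacaoPorBits_alt palavra size =
      ((bPotencias size 1).map (fun j => (j, (pvGD palavra.toList size j).items)),
       (bPotencias size 1).map (fun j => (j, pvCN palavra.toList size j))) := by
    simp only [SeparacaoPorBits_alt]
    rw [insert_fold_eq_pvMk (bPotencias size 1) hnd (fun _ => PySem.Dict.empty),
      insert_fold_eq_pvMk (bPotencias size 1) hnd (fun _ => (0:Int)),
      bFold palavra.toList (bPotencias size 1) hnd (PySem.List.pyRange 1 (size + 1))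
        (fun _ => PySem.Dict.empty) (fun _ => 0)]
    simp only [pvMk, List.map_map]
    rfl
  rw [hAside, hBside]
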